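-- pv_equiv track=rewrite | github.com/gillham/C64 | C64OS/ptext/mtext_help2ptext.py | scan_codes
-- ===== SOURCE A (Python) =====
-- MTEXT_MIN = 0xE0
--
-- MTEXT_MAX = 0xF8
--
-- MTEXT = {
--     # link text / path delimiter
--     0x02: (str, " ", ""),
--     # link end/stop marker
--     0x03: (str, ">", ""),
--     0xE0: (str, "<c:black>", ""),
--     0xE1: (str, "<c:white>", ""),
--     0xE2: (str, "<c:red>", ""),
--     0xE3: (str, "<c:cyan>", ""),
--     0xE4: (str, "<c:purple>", ""),
--     0xE5: (str, "<c:green>", ""),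
--     0xE6: (str, "<c:blue>", ""),
--     0xE7: (str, "<c:yellow>", ""),
--     0xE8: (str, "<c:orange>", ""),
--     0xE9: (str, "<c:brown>", ""),
--     0xEA: (str, "<c:light red>", ""),
--     0xEB: (str, "<c:dark gray>", ""),
--     0xEC: (str, "<c:medium gray>", ""),
--     0xED: (str, "<c:light green>", ""),
--     0xEE: (str, "<c:light blue>", ""),
--     0xEF: (str, "<c:light gray>", ""),
--     0xF0: (str, "<t:normal>", ""),
--     0xF1: (str, "<t:strong>", ""),
--     0xF2: (str, "<t:emphatic>", ""),
--     0xF3: (str, "<l:", ""),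
--     0xF4: (str, "<j:left>", ""),
--     0xF5: (str, "<j:right>", ""),
--     0xF6: (str, "<j:center>", ""),
--     0xF7: (str, "<j:full>", ""),
--     # horizontal rule
--     0xF8: (str, "<h:", ""),
-- }
--
-- PET_REMAP = {0xA4: "_", 0x0D: chr(0x0A)}
--
-- def pet2ascii(petscii):
--     """Convert PETSCII string to ASCII with some substitutions."""
--     ascii_string = ""
--     # based on the algorithm SD2IEC uses for FAT32 names.
--     for char in petscii:
--         if (128 + 64) < char < (128 + 91):
--             char -= 128
--         elif (96 - 32) < char < (123 - 32):
--             char += 32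
--         elif (192 - 128) < char < (219 - 128):
--             char += 128
--         elif char == 255:
--             char = "~"
--         # remap some special characters
--         if char in PET_REMAP:
--             char = ord(PET_REMAP[char])
--         ascii_string += chr(char)
--     return ascii_string
--
-- def scan_codes(binary):
--     content = ""
--     end_stack = []
--
--     # convert binary petscii to ascii
--     data = pet2ascii(binary)
--
--     for char in data:
--         byte = ord(char)
--         if (MTEXT_MIN <= byte <= MTEXT_MAX) or (1 < byte < 4):
--             if byte in MTEXT:
--                 # pop any end code for previous tag
--                 if len(end_stack) > 0:
--                     content += end_stack.pop()
--                 funct = MTEXT.get(byte)[0]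
--                 param = MTEXT.get(byte)[1]
--                 endmark = MTEXT.get(byte)[2]
--                 content += funct(param)
--                 # push end mark for this tag/code onto stack
--                 end_stack.append(endmark)
--         else:
--             content += char
--
--     return content
-- ===== SOURCE B (Python) =====
-- # One precomputed translation table (code -> replacement string); single join, no stack.
-- _TABLE = {
--     0x02: " ", 0x03: ">",
--     0xE0: "<c:black>", 0xE1: "<c:white>", 0xE2: "<c:red>", 0xE3: "<c:cyan>",
--     0xE4: "<c:purple>", 0xE5: "<c:green>", 0xE6: "<c:blue>", 0xE7: "<c:yellow>",
--     0xE8: "<c:orange>", 0xE9: "<c:brown>", 0xEA: "<c:light red>", 0xEB: "<c:dark gray>",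
--     0xEC: "<c:medium gray>", 0xED: "<c:light green>", 0xEE: "<c:light blue>",
--     0xEF: "<c:light gray>", 0xF0: "<t:normal>", 0xF1: "<t:strong>", 0xF2: "<t:emphatic>",
--     0xF3: "<l:", 0xF4: "<j:left>", 0xF5: "<j:right>", 0xF6: "<j:center>", 0xF7: "<j:full>",
--     0xF8: "<h:",
--     0x0D: "\n", 0xA4: "_", 0xFF: "~",
-- }
-- for _c in range(193, 219):
--     _TABLE[_c] = chr(_c - 128)
-- for _c in range(65, 91):
--     _TABLE[_c] = chr(_c + 32)
--
-- def scan_codes(binary):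
--     return "".join(_TABLE[c] if c in _TABLE else chr(c) for c in binary)
-- ===== Notes on version B (the rewrite author's own statement) =====
-- stated objective: idiomatic
-- what changed: B replaces A's two passes (pet2ascii building an intermediate string, then a stateful scan with an end_stack whose pops/pushes are no-ops since every endmark is empty) by one precomputed code-to-markup translation table covering both the PETSCII remapping and the markup codes, applied in a single join over the input.
-- outside the precondition, e.g. on scan_codes([255]): A raises TypeError, B returns '~'
import Mathlib
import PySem

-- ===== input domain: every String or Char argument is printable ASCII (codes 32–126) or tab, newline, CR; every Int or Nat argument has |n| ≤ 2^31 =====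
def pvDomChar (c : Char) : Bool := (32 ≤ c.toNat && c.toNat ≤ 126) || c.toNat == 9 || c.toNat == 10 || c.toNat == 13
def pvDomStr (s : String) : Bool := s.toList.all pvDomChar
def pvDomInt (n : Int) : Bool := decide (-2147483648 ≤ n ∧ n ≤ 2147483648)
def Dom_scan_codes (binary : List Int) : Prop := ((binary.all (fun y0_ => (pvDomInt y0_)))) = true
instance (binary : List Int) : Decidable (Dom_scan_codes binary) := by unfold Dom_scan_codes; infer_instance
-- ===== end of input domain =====

-- B replaces A's char-by-char markup scan (with its no-op end_stack) by one precomputed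
-- code→markup translation table and a single join; equivalence of return values is proved on Pre_.

-- ===== PORT A =====

-- chr(n): exact for every non-surrogate codepoint 0 ≤ n ≤ 0x10FFFF (Python chr raises outside
-- [0, 0x10FFFF], surrogates are not Lean Chars; both are excluded by Pre_scan_codes)
def pyChr (n : Int) : Char := Char.ofNat n.toNat

-- ord(s) for a one-character string
def pyOrdStr (s : String) : Int := ((s.toList.headD ' ').toNat : Int)

def PET_REMAP : PySem.Dict Int String := PySem.Dict.ofList [(0xA4, "_"), (0x0D, "\n")]

-- the body of pet2ascii's loop (one character)
def pet2asciiChar (c0 : Int) : Char :=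
  let c : Int :=
    if 192 < c0 ∧ c0 < 219 then c0 - 128
    else if 64 < c0 ∧ c0 < 91 then c0 + 32
    else if 64 < c0 ∧ c0 < 91 then c0 + 128   -- dead elif kept from A
    else if c0 = 255 then 126                  -- A sets char = "~"; A then raises TypeError at
                                               -- chr("~"), so 255 is outside Pre_scan_codes
    else c0
  let c : Int :=
    match PySem.Dict.get? PET_REMAP c with
    | some s => pyOrdStr s
    | none => c
  pyChr c

def pet2ascii (petscii : List Int) : List Char :=
  petscii.foldl (fun acc ch => acc ++ [pet2asciiChar ch]) []

-- MTEXT with the constant `str` constructor dropped: funct(param) = str(param) = param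
def MTEXT : PySem.Dict Int (String × String) := PySem.Dict.ofList [
  (0x02, (" ", "")), (0x03, (">", "")),
  (0xE0, ("<c:black>", "")), (0xE1, ("<c:white>", "")), (0xE2, ("<c:red>", "")),
  (0xE3, ("<c:cyan>", "")), (0xE4, ("<c:purple>", "")), (0xE5, ("<c:green>", "")),
  (0xE6, ("<c:blue>", "")), (0xE7, ("<c:yellow>", "")), (0xE8, ("<c:orange>", "")),
  (0xE9, ("<c:brown>", "")), (0xEA, ("<c:light red>", "")), (0xEB, ("<c:dark gray>", "")),
  (0xEC, ("<c:medium gray>", "")), (0xED, ("<c:light green>", "")), (0xEE, ("<c:light blue>", "")),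
  (0xEF, ("<c:light gray>", "")), (0xF0, ("<t:normal>", "")), (0xF1, ("<t:strong>", "")),
  (0xF2, ("<t:emphatic>", "")), (0xF3, ("<l:", "")), (0xF4, ("<j:left>", "")),
  (0xF5, ("<j:right>", "")), (0xF6, ("<j:center>", "")), (0xF7, ("<j:full>", "")),
  (0xF8, ("<h:", ""))]

-- one iteration of scan_codes' loop over (content, end_stack)
def scanStep (st : List Char × List String) (ch : Char) : List Char × List String :=
  let content := st.1
  let end_stack := st.2
  let byte : Int := (ch.toNat : Int)
  if (224 ≤ byte ∧ byte ≤ 248) ∨ (1 < byte ∧ byte < 4) then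
    match PySem.Dict.get? MTEXT byte with
    | some pe =>
      -- pop any end code for previous tag
      let content := if end_stack.length > 0 then content ++ (end_stack.getLastD "").toList else content
      let end_stack := if end_stack.length > 0 then end_stack.dropLast else end_stack
      -- content += funct(param); push endmark
      (content ++ pe.1.toList, end_stack ++ [pe.2])
    | none => (content, end_stack)
  else (content ++ [ch], end_stack)

def scan_codes (binary : List Int) : String :=
  let data := pet2ascii binary
  String.ofList ((data.foldl scanStep ([], []))).1

-- ===== PORT B =====

def baseTable : PySem.Dict Int String := PySem.Dict.ofList [
  (0x02, " "), (0x03, ">"),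
  (0xE0, "<c:black>"), (0xE1, "<c:white>"), (0xE2, "<c:red>"), (0xE3, "<c:cyan>"),
  (0xE4, "<c:purple>"), (0xE5, "<c:green>"), (0xE6, "<c:blue>"), (0xE7, "<c:yellow>"),
  (0xE8, "<c:orange>"), (0xE9, "<c:brown>"), (0xEA, "<c:light red>"), (0xEB, "<c:dark gray>"),
  (0xEC, "<c:medium gray>"), (0xED, "<c:light green>"), (0xEE, "<c:light blue>"),
  (0xEF, "<c:light gray>"), (0xF0, "<t:normal>"), (0xF1, "<t:strong>"), (0xF2, "<t:emphatic>"),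
  (0xF3, "<l:"), (0xF4, "<j:left>"), (0xF5, "<j:right>"), (0xF6, "<j:center>"),
  (0xF7, "<j:full>"), (0xF8, "<h:"),
  (0x0D, "\n"), (0xA4, "_"), (0xFF, "~")]

def altTable : PySem.Dict Int String :=
  let t := (PySem.List.pyRange 193 219 1).foldl
    (fun t c => PySem.Dict.insert t c (String.ofList [pyChr (c - 128)])) baseTable
  (PySem.List.pyRange 65 91 1).foldl
    (fun t c => PySem.Dict.insert t c (String.ofList [pyChr (c + 32)])) t

-- one element of the generator: _TABLE[c] if c in _TABLE else chr(c)
def altPiece (c : Int) : String :=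
  if PySem.Dict.contains altTable c then (PySem.Dict.get? altTable c).getD "" else String.ofList [pyChr c]

def scan_codes_alt (binary : List Int) : String :=
  PySem.Str.join "" (binary.map altPiece)

-- ===== PRECONDITION & SPEC =====
-- Pre_ excludes exactly the codes on which A raises (chr: ValueError outside [0, 0x10FFFF];
-- 255: char becomes the str "~" and chr("~") raises TypeError) and surrogate codepoints,
-- on which A's result is a lone-surrogate str that is not a representable Unicode string.
def Pre_scan_codes (binary : List Int) : Prop :=
  ∀ c ∈ binary, 0 ≤ c ∧ c ≤ 1114111 ∧ ¬ (55296 ≤ c ∧ c ≤ 57343) ∧ c ≠ 255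
instance (binary : List Int) : Decidable (Pre_scan_codes binary) := by
  unfold Pre_scan_codes; infer_instance

def pvWitness_scan_codes : List Int := [65, 2, 224, 13, 164, 100, 32]

def Spec_scan_codes (binary : List Int) (out : String) : Prop := out = scan_codes_alt binary
instance (binary : List Int) (out : String) : Decidable (Spec_scan_codes binary out) := by
  unfold Spec_scan_codes; infer_instance

-- ===== CLAIM (what is proved, stated in full; the proofs are below) =====
def Claim_equal_scan_codes : Prop := ∀ (binary : List Int), Dom_scan_codes binary →
  Pre_scan_codes binary → Spec_scan_codes binary (scan_codes binary)

-- ===== LEMMAS AND PROOFS =====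

-- what A contributes to content for one (already pet2ascii'd) character
def aPiece (ch : Char) : List Char :=
  let byte : Int := (ch.toNat : Int)
  if (224 ≤ byte ∧ byte ≤ 248) ∨ (1 < byte ∧ byte < 4) then
    match PySem.Dict.get? MTEXT byte with
    | some pe => pe.1.toList
    | none => []
  else [ch]

theorem toNat_ofNat_valid (n : Nat) (h : n.isValidChar) : (Char.ofNat n).toNat = n := by
  simp [Char.ofNat, h, Char.ofNatAux, Char.toNat]

theorem mtext_endmark_empty : ∀ byte pe, PySem.Dict.get? MTEXT byte = some pe → pe.2 = "" := by
  intro byte pe h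
  have hmem := PySem.Dict.mem_items_of_get?_eq_some MTEXT h
  have hall : MTEXT.items.all (fun p => p.2.2 == "") = true := by decide
  simpa using List.all_eq_true.mp hall _ hmem

theorem stack_getLastD (stack : List String) (h : ∀ s ∈ stack, s = "") :
    stack.getLast?.getD "" = "" := by
  cases hs : stack.getLast? with
  | none => simp
  | some v =>
    have hv : v ∈ stack := List.mem_of_getLast? hs
    simp [h v hv]

theorem scan_foldl_char (l : List Char) :
    ∀ (content : List Char) (stack : List String), (∀ s ∈ stack, s = "") →
      (l.foldl scanStep (content, stack)).1 = content ++ l.flatMap aPiece ∧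
      (∀ s ∈ (l.foldl scanStep (content, stack)).2, s = "") := by
  induction l with
  | nil => intro content stack h; exact ⟨by simp, h⟩
  | cons ch t ih =>
    intro content stack hstack
    rw [List.foldl_cons]
    by_cases hc : (224 ≤ (ch.toNat : Int) ∧ (ch.toNat : Int) ≤ 248) ∨
        (1 < (ch.toNat : Int) ∧ (ch.toNat : Int) < 4)
    · have hcn : 224 ≤ ch.toNat ∧ ch.toNat ≤ 248 ∨ 1 < ch.toNat ∧ ch.toNat < 4 := by omega
      cases hm : PySem.Dict.get? MTEXT ((ch.toNat : Int)) with
      | some pe =>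
        have hstep : scanStep (content, stack) ch =
            (content ++ pe.1.toList,
             (if stack.length > 0 then stack.dropLast else stack) ++ [pe.2]) := by
          by_cases hl : stack.length > 0 <;>
            simp [scanStep, hcn, hm, hl, stack_getLastD stack hstack]
        rw [hstep]
        have hstack' : ∀ s ∈ (if stack.length > 0 then stack.dropLast else stack) ++ [pe.2],
            s = "" := by
          intro s hs
          rcases List.mem_append.mp hs with h1 | h1
          · split at h1
            · exact hstack s (List.dropLast_subset _ h1)
            · exact hstack s h1
          · simp at h1; subst h1; exact mtext_endmark_empty _ _ hm
        obtain ⟨ha, hb⟩ := ih (content ++ pe.1.toList) _ hstack'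
        refine ⟨?_, hb⟩
        rw [ha]
        have hap : aPiece ch = pe.1.toList := by simp [aPiece, hcn, hm]
        simp [hap]
      | none =>
        have hstep : scanStep (content, stack) ch = (content, stack) := by
          simp [scanStep, hcn, hm]
        rw [hstep]
        obtain ⟨ha, hb⟩ := ih content stack hstack
        refine ⟨?_, hb⟩
        rw [ha]
        have hap : aPiece ch = [] := by simp [aPiece, hcn, hm]
        simp [hap]
    · have hcn : ¬ (224 ≤ ch.toNat ∧ ch.toNat ≤ 248 ∨ 1 < ch.toNat ∧ ch.toNat < 4) := by omega
      have hstep : scanStep (content, stack) ch = (content ++ [ch], stack) := by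
        simp [scanStep, hcn]
      rw [hstep]
      obtain ⟨ha, hb⟩ := ih (content ++ [ch]) stack hstack
      refine ⟨?_, hb⟩
      rw [ha]
      have hap : aPiece ch = [ch] := by simp [aPiece, hcn]
      simp [hap]

set_option maxHeartbeats 4000000 in
set_option maxRecDepth 10000 in
theorem piece_small :
    ∀ n ∈ List.range 256, aPiece (pet2asciiChar (n : Int)) = (altPiece (n : Int)).toList := by
  decide

set_option maxRecDepth 2000 in
theorem altTable_keys_small : altTable.keys.all (fun k => decide (k < 256)) = true := by
  decide

theorem piece_large (c : Int) (h256 : 256 ≤ c) (hle : c ≤ 1114111)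
    (hsur : ¬ (55296 ≤ c ∧ c ≤ 57343)) :
    aPiece (pet2asciiChar c) = (altPiece c).toList := by
  have hb1 : ((164 : Int) == c) = false := beq_eq_false_iff_ne.mpr (by omega)
  have hb2 : ((13 : Int) == c) = false := beq_eq_false_iff_ne.mpr (by omega)
  have h1 : ¬ (192 < c ∧ c < 219) := by omega
  have h2 : ¬ (64 < c ∧ c < 91) := by omega
  have h3 : c ≠ 255 := by omega
  have hvalid : c.toNat.isValidChar := by
    have := Int.toNat_of_nonneg (show (0:Int) ≤ c by omega)
    simp only [Nat.isValidChar]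
    omega
  have hPR : PET_REMAP = PySem.Dict.mk [(164, "_"), (13, "\n")] := by decide
  have hch : pet2asciiChar c = pyChr c := by
    have h0 : ({ items := [] } : PySem.Dict Int String).get? c = none := rfl
    simp [pet2asciiChar, h1, h2, h3, hPR, PySem.Dict.get?_mk_cons, hb1, hb2, h0]
  have hbyte : ((pyChr c).toNat : Int) = c := by
    simp [pyChr, toNat_ofNat_valid _ hvalid, Int.toNat_of_nonneg (show (0:Int) ≤ c by omega)]
  have hcon : PySem.Dict.contains altTable c = false := by
    by_contra h
    have hmem := (PySem.Dict.contains_iff_mem_keys altTable c).mp (by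
      cases hh : PySem.Dict.contains altTable c
      · exact absurd hh h
      · rfl)
    have := List.all_eq_true.mp altTable_keys_small _ hmem
    simp at this; omega
  have hA : aPiece (pet2asciiChar c) = [pyChr c] := by
    rw [hch]
    simp only [aPiece, hbyte]
    rw [if_neg (by omega)]
  have hB : altPiece c = String.ofList [pyChr c] := by
    simp [altPiece, hcon]
  rw [hA, hB]; simp

theorem piece_eq (c : Int)
    (h : 0 ≤ c ∧ c ≤ 1114111 ∧ ¬ (55296 ≤ c ∧ c ≤ 57343) ∧ c ≠ 255) :
    aPiece (pet2asciiChar c) = (altPiece c).toList := by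
  obtain ⟨h0, hle, hsur, _⟩ := h
  by_cases hlt : c < 256
  · have hmem : c.toNat ∈ List.range 256 := by
      simp [List.mem_range]; omega
    have := piece_small c.toNat hmem
    rwa [Int.toNat_of_nonneg h0] at this
  · exact piece_large c (by omega) hle hsur

theorem join_nil_sep (parts : List (List Char)) :
    PySem.Chars.join [] parts = parts.flatten := by
  induction parts with
  | nil => simp [PySem.Chars.join_nil]
  | cons p rest ih =>
    cases rest with
    | nil => simp [PySem.Chars.join_singleton]
    | cons q r => rw [PySem.Chars.join_cons_cons]; simp_all

-- ===== VERDICT (by name: the statement is the Claim_ definition above) =====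
set_option maxRecDepth 8000 in
theorem scan_codes_spec : Claim_equal_scan_codes := by
  intro binary hdom hpre
  unfold Spec_scan_codes scan_codes scan_codes_alt
  show String.ofList ((pet2ascii binary).foldl scanStep ([], [])).1 =
    PySem.Str.join "" (binary.map altPiece)
  have hpet : pet2ascii binary = binary.map pet2asciiChar := by
    unfold pet2ascii
    rw [PySem.List.foldl_append_singleton_eq_map]
    rfl
  rw [hpet]
  obtain ⟨ha, _⟩ := scan_foldl_char (binary.map pet2asciiChar) [] [] (by simp)
  rw [ha]
  unfold PySem.Str.join
  congr 1
  have hsep : ("" : String).toList = [] := rfl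
  rw [hsep, join_nil_sep]
  simp only [List.nil_append, List.flatMap_def, List.map_map]
  congr 1
  apply List.map_congr_left
  intro c hc
  exact piece_eq c (hpre c hc)
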